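-- pv_equiv track=rewrite | github.com/chrisculver/WickContractions | examples/Nc_baryon.py | check_symmetric
-- ===== SOURCE A (Python) =====
-- import itertools
--
-- def check_symmetric(Nc, state1, state2):
--     symmetric = False
--     # break apart into quarks
--     quarks = [state2[i:i + 2] for i in range(0, 2 * Nc, 2)]
--     quark_permutations = itertools.permutations(quarks, Nc)
--     # put string back together
--     quark_permutations = [''.join(perm) for perm in quark_permutations]
--     if state1 in quark_permutations:
--         symmetric = True
--     return symmetric
-- ===== SOURCE B (Python) =====
-- def check_symmetric(Nc, state1, state2):
--     # state1 is symmetric to state2 iff state1 can be built by concatenating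
--     # state2's quark pieces in some order; test that directly by backtracking
--     # on which piece the string starts with, instead of enumerating the
--     # Nc! permutations.
--     quarks = [state2[i:i + 2] for i in range(0, 2 * Nc, 2)]
--
--     def can_build(s, pieces):
--         if not s:
--             return not any(pieces)
--         tried = set()
--         for i, p in enumerate(pieces):
--             if p and p not in tried:
--                 tried.add(p)
--                 if s.startswith(p) and can_build(s[len(p):], pieces[:i] + pieces[i + 1:]):
--                     return True
--         return False
--
--     return can_build(state1, quarks)
-- ===== Notes on version B (the rewrite author's own statement) =====
-- stated objective: alternative
-- what changed: Instead of materialising all Nc! permutations of state2's quark chunks and testing membership, B backtracks directly on which quark piece state1 starts with (deduplicating equal pieces), consuming the string piece by piece; Pre_ excludes only Nc < 0, where A raises ValueError.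
import Mathlib
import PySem

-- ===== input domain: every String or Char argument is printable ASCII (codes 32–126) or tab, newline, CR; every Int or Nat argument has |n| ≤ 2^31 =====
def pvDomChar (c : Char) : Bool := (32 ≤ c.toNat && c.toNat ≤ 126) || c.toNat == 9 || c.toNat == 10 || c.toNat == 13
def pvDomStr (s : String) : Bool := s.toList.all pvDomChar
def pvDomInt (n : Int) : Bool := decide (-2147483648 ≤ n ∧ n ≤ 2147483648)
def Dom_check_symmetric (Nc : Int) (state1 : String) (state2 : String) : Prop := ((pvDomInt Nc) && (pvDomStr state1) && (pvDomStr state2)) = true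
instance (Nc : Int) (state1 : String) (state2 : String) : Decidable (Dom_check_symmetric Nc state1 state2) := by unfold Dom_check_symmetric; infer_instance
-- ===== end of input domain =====

-- B tests directly whether state1 can be built by concatenating state2's quark pieces in
-- some order (backtracking on the piece the string starts with) instead of materialising
-- all Nc! permutations of the pieces (objective: alternative algorithm).

-- ===== PORT A =====
def check_symmetric (Nc : Int) (state1 : String) (state2 : String) : Bool :=
  let symmetric := false
  -- break apart into quarks
  let quarks := (PySem.List.pyRange 0 (2 * Nc) 2).map
    (fun i => PySem.Str.slice state2 (some i) (some (i + 2)))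
  let quark_permutations := PySem.List.permutations quarks Nc.toNat
  -- put string back together
  let quark_permutations := quark_permutations.map (fun perm => PySem.Str.join "" perm)
  let symmetric := if quark_permutations.contains state1 then true else symmetric
  symmetric

-- ===== PORT B =====
-- termination fact for the ports below: consuming a nonempty prefix shortens the string
theorem startswith_len_lt (s p : String) (hp : ¬ p = "") (hx : PySem.Str.startswith s p = true) :
    (PySem.Str.slice s (some (PySem.Str.len p)) none).toList.length < s.toList.length := by
  rw [PySem.Str.toList_slice, PySem.Chars.slice_eq_listSlice, PySem.Str.len_eq,
    PySem.List.slice_from_natCast, List.length_drop]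
  rw [PySem.Str.startswith_eq, PySem.Chars.startswith_iff] at hx
  have hle := hx.length_le
  have hpl : 0 < p.toList.length := by
    cases hq : p.toList with
    | nil => exact absurd (String.toList_inj.mp (by rw [hq]; rfl)) hp
    | cons c t => simp [hq]
  omega

mutual
-- can_build(s, pieces) of Source B
def check_can_build (s : String) (pieces : List String) : Bool :=
  if s == "" then !(pieces.any (fun p => !(p == "")))
  else check_can_go s pieces (PySem.List.enumerate pieces 0) PySem.Set.empty
  termination_by (s.toList.length, pieces.length + 1)
  decreasing_by
    apply Prod.Lex.right; simp [PySem.List.length_enumerate]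

-- the 'for i, p in enumerate(pieces)' loop of can_build, with its early return
def check_can_go (s : String) (pieces : List String) : List (Int × String) → PySem.Set String → Bool
  | [], _ => false
  | (i, p) :: rest, tried =>
    if hpt : ((!(p == "")) && !(PySem.Set.contains tried p)) = true then
      let tried' := PySem.Set.add tried p
      if hx : PySem.Str.startswith s p = true then
        if check_can_build (PySem.Str.slice s (some (PySem.Str.len p)) none)
            (PySem.List.slice pieces none (some i) ++ PySem.List.slice pieces (some (i + 1)) none) then true
        else check_can_go s pieces rest tried'
      else check_can_go s pieces rest tried'
    else check_can_go s pieces rest tried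
  termination_by r t => (s.toList.length, r.length)
  decreasing_by
  · apply Prod.Lex.left
    apply startswith_len_lt s p ?_ hx
    simp only [Bool.and_eq_true, Bool.not_eq_true'] at hpt
    exact fun he => by simp [he] at hpt
  · apply Prod.Lex.right; simp
  · apply Prod.Lex.right; simp
  · apply Prod.Lex.right; simp
end

def check_symmetric_alt (Nc : Int) (state1 : String) (state2 : String) : Bool :=
  let quarks := (PySem.List.pyRange 0 (2 * Nc) 2).map
    (fun i => PySem.Str.slice state2 (some i) (some (i + 2)))
  check_can_build state1 quarks

-- ===== PRECONDITION & SPEC =====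
-- Pre_ excludes exactly Nc < 0, where A raises ValueError (itertools.permutations with a
-- negative r); A returns normally on every input with Nc ≥ 0.
def Pre_check_symmetric (Nc : Int) (state1 : String) (state2 : String) : Prop := 0 ≤ Nc
instance (Nc : Int) (state1 : String) (state2 : String) : Decidable (Pre_check_symmetric Nc state1 state2) := by unfold Pre_check_symmetric; infer_instance

def pvWitness_check_symmetric : Int × String × String := (2, "cdab", "abcd")

def Spec_check_symmetric (Nc : Int) (state1 : String) (state2 : String) (out : Bool) : Prop := out = check_symmetric_alt Nc state1 state2
instance (Nc : Int) (state1 : String) (state2 : String) (out : Bool) : Decidable (Spec_check_symmetric Nc state1 state2 out) := by unfold Spec_check_symmetric; infer_instance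

-- ===== CLAIM (what is proved, stated in full; the proofs are below) =====
def Claim_equal_check_symmetric : Prop := ∀ (Nc : Int) (state1 : String) (state2 : String), Dom_check_symmetric Nc state1 state2 → Pre_check_symmetric Nc state1 state2 → Spec_check_symmetric Nc state1 state2 (check_symmetric Nc state1 state2)

-- ===== LEMMAS AND PROOFS =====

theorem join_empty_eq_flatten (L : List (List Char)) :
    PySem.Chars.join [] L = L.flatten := by
  induction L with
  | nil => simp [PySem.Chars.join_nil]
  | cons p L ih =>
      cases L with
      | nil => simp [PySem.Chars.join_singleton]
      | cons q rest =>
          rw [PySem.Chars.join_cons_cons]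
          simp only [List.flatten_cons] at ih ⊢
          simp [ih]

theorem mem_permutations_of_perm {α : Type} (p xs : List α) (h : p.Perm xs) :
    p ∈ PySem.List.permutations xs xs.length := by
  induction p generalizing xs with
  | nil =>
      have hx : xs = [] := h.symm.eq_nil
      subst hx
      simp
  | cons a p ih =>
      have ha : a ∈ xs := h.subset (List.mem_cons_self ..)
      obtain ⟨i, hi, hget⟩ := List.getElem_of_mem ha
      have hperm : (xs[i] :: xs.eraseIdx i).Perm xs := List.getElem_cons_eraseIdx_perm hi
      rw [hget] at hperm
      have hp2 : p.Perm (xs.eraseIdx i) := (List.perm_cons a).mp (h.trans hperm.symm)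
      have hxpos : 0 < xs.length := by omega
      have hxlen : xs.length = (xs.length - 1) + 1 := by omega
      rw [hxlen, PySem.List.permutations]
      refine List.mem_flatMap.mpr ⟨i, List.mem_range.mpr hi, ?_⟩
      rw [List.getElem?_eq_getElem hi, hget]
      refine List.mem_map.mpr ⟨p, ?_, rfl⟩
      have hih := ih _ hp2
      rwa [List.length_eraseIdx_of_lt hi] at hih

theorem length_quarks (Nc : Int) (h0 : 0 ≤ Nc) (state2 : String) :
    ((PySem.List.pyRange 0 (2 * Nc) 2).map
      (fun i => PySem.Str.slice state2 (some i) (some (i + 2)))).length = Nc.toNat := by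
  rw [List.length_map, PySem.List.pyRange_of_pos 0 (2 * Nc) (by norm_num), List.length_map,
    List.length_range]
  split_ifs with hpos
  · rw [show 2 * Nc - 0 + 2 - 1 = 2 * Nc + 1 by ring,
      show (2 * Nc + 1) / 2 = Nc from by
        rw [show 2 * Nc + 1 = 1 + Nc * 2 by ring, Int.add_mul_ediv_right 1 Nc (by norm_num)]
        norm_num]
  · omega

-- A = true iff some permutation of the quark list flattens (char-wise) to state1
theorem checkA_iff (Nc : Int) (state1 state2 : String) (h0 : 0 ≤ Nc) :
    check_symmetric Nc state1 state2 = true ↔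
      ∃ p : List String,
        p.Perm ((PySem.List.pyRange 0 (2 * Nc) 2).map
          (fun i => PySem.Str.slice state2 (some i) (some (i + 2)))) ∧
        (p.map String.toList).flatten = state1.toList := by
  have hlen := length_quarks Nc h0 state2
  unfold check_symmetric
  simp only []
  have hif : ∀ (b : Bool), (if b = true then true else false) = b := by
    intro b; cases b <;> rfl
  rw [hif, List.contains_iff_exists_mem_beq]
  constructor
  · rintro ⟨j, hjm, hbeq⟩
    obtain ⟨q, hqmem, rfl⟩ := List.mem_map.mp hjm
    have hjoin : PySem.Str.join "" q = state1 := (beq_iff_eq.mp hbeq).symm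
    refine ⟨q, ?_, ?_⟩
    · rw [← hlen] at hqmem
      exact PySem.List.perm_of_mem_permutations hqmem
    · rw [← hjoin, PySem.Str.toList_join]
      have hsep : ("" : String).toList = [] := rfl
      rw [hsep, join_empty_eq_flatten]
  · rintro ⟨q, hq, hflat⟩
    refine ⟨PySem.Str.join "" q, List.mem_map.mpr ⟨q, ?_, rfl⟩, ?_⟩
    · rw [← hlen]
      exact mem_permutations_of_perm q _ hq
    · refine beq_iff_eq.mpr (String.toList_inj.mp ?_).symm
      rw [PySem.Str.toList_join]
      have hsep : ("" : String).toList = [] := rfl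
      rw [hsep, join_empty_eq_flatten]
      exact hflat

theorem flatten_filter_not_isEmpty (K : List (List Char)) :
    (K.filter (fun p => !p.isEmpty)).flatten = K.flatten := by
  induction K with
  | nil => rfl
  | cons p K ih =>
      by_cases hp : p.isEmpty
      · have hpnil : p = [] := by simpa [List.isEmpty_iff] using hp
        subst hpnil
        simpa [List.filter_cons] using ih
      · simp [List.filter_cons, hp, ih]

-- permutation-transport of "some reordering of L flattens to s"
theorem exists_perm_congr (L1 L2 : List (List Char)) (h : L1.Perm L2) (s : List Char) :
    (∃ K : List (List Char), K.Perm L1 ∧ K.flatten = s) ↔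
      (∃ K : List (List Char), K.Perm L2 ∧ K.flatten = s) := by
  constructor
  · rintro ⟨K, hK, hf⟩; exact ⟨K, hK.trans h, hf⟩
  · rintro ⟨K, hK, hf⟩; exact ⟨K, hK.trans h.symm, hf⟩

theorem canBuild_empty_iff (pieces : List String) :
    check_can_build "" pieces = true ↔
      ∃ K : List (List Char), K.Perm (pieces.map String.toList) ∧ K.flatten = [] := by
  rw [check_can_build]
  simp only [BEq.rfl, if_true, Bool.not_eq_true', List.any_eq_false, Bool.not_eq_false,
    beq_iff_eq]
  constructor
  · intro hall
    refine ⟨pieces.map String.toList, List.Perm.refl _, List.flatten_eq_nil_iff.mpr ?_⟩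
    intro l hl
    obtain ⟨p, hp, rfl⟩ := List.mem_map.mp hl
    rw [hall p hp]
    rfl
  · rintro ⟨K, hperm, hflat⟩
    intro p hp
    have hmem : p.toList ∈ K := hperm.mem_iff.mpr (List.mem_map_of_mem hp)
    have hnil : p.toList = [] := List.flatten_eq_nil_iff.mp hflat _ hmem
    exact String.toList_inj.mp (by rw [hnil]; rfl)

theorem canGo_iff (n : Nat)
    (ih : ∀ (s' : String) (pieces' : List String), s'.toList.length < n →
      (check_can_build s' pieces' = true ↔
        ∃ K : List (List Char), K.Perm (pieces'.map String.toList) ∧ K.flatten = s'.toList))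
    (s : String) (hn : s.toList.length = n) (pieces : List String)
    (rest : List (Int × String)) :
    ∀ (tried : PySem.Set String),
    (∀ q ∈ rest, ∃ k : Nat, q.1 = (k : Int) ∧ pieces[k]? = some q.2) →
    (check_can_go s pieces rest tried = true ↔
      ∃ p : String, p ∈ rest.map (·.2) ∧ p ≠ "" ∧ PySem.Set.contains tried p = false ∧
        PySem.Str.startswith s p = true ∧
        ∃ K : List (List Char), K.Perm ((pieces.map String.toList).erase p.toList) ∧
          K.flatten = s.toList.drop p.toList.length) := by
  induction rest with
  | nil =>
      intro tried _
      rw [check_can_go]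
      simp
  | cons q rest ihr =>
      obtain ⟨i, p⟩ := q
      intro tried hmem
      obtain ⟨k, hik, hkp⟩ := hmem (i, p) (List.mem_cons_self ..)
      simp only at hik hkp
      obtain ⟨hklt, hkget⟩ := List.getElem?_eq_some_iff.mp hkp
      have hmem' := fun q hq => hmem q (List.mem_cons_of_mem _ hq)
      rw [check_can_go]
      by_cases hcond : ((!(p == "")) && !(PySem.Set.contains tried p)) = true
      · rw [dif_pos hcond]
        have hp0 : p ≠ "" := by
          simp only [Bool.and_eq_true, Bool.not_eq_true', beq_eq_false_iff_ne, ne_eq] at hcond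
          exact hcond.1
        have htr0 : PySem.Set.contains tried p = false := by
          simp only [Bool.and_eq_true, Bool.not_eq_true'] at hcond
          exact hcond.2
        -- the erased piece lists agree up to permutation
        have hklt' : k < (pieces.map String.toList).length := by
          rw [List.length_map]; exact hklt
        have hplist : (pieces.map String.toList)[k]'hklt' = p.toList := by
          rw [List.getElem_map, hkget]
        have hmemmap : p.toList ∈ pieces.map String.toList := by
          rw [← hplist]; exact List.getElem_mem hklt'
        have heperm : ((pieces.eraseIdx k).map String.toList).Perm
            ((pieces.map String.toList).erase p.toList) := by
          have h1 : (p.toList :: (pieces.map String.toList).eraseIdx k).Perm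
              (pieces.map String.toList) := by
            rw [← hplist]; exact List.getElem_cons_eraseIdx_perm hklt'
          have h2 := (h1.trans (List.perm_cons_erase hmemmap)).cons_inv
          rw [List.eraseIdx_map] at h2
          exact h2
        by_cases hx : PySem.Str.startswith s p = true
        · rw [dif_pos hx]
          have hple : p.toList.length ≤ s.toList.length := by
            rw [PySem.Str.startswith_eq, PySem.Chars.startswith_iff] at hx
            exact hx.length_le
          have hppos : 0 < p.toList.length := by
            cases hq : p.toList with
            | nil => exact absurd (String.toList_inj.mp (by rw [hq]; rfl)) hp0
            | cons c t => simp
          have hslice1 : (PySem.Str.slice s (some (PySem.Str.len p)) none).toList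
              = s.toList.drop p.toList.length := by
            rw [PySem.Str.toList_slice, PySem.Chars.slice_eq_listSlice, PySem.Str.len_eq,
              PySem.List.slice_from_natCast]
          have hpieces : PySem.List.slice pieces none (some i)
              ++ PySem.List.slice pieces (some (i + 1)) none = pieces.eraseIdx k := by
            rw [hik, PySem.List.slice_to_natCast,
              show (k : Int) + 1 = ((k + 1 : Nat) : Int) from by push_cast; ring,
              PySem.List.slice_from_natCast, List.eraseIdx_eq_take_drop_succ]
          have hCB : (check_can_build (PySem.Str.slice s (some (PySem.Str.len p)) none)
              (PySem.List.slice pieces none (some i)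
                ++ PySem.List.slice pieces (some (i + 1)) none) = true) ↔
              ∃ K : List (List Char), K.Perm ((pieces.map String.toList).erase p.toList) ∧
                K.flatten = s.toList.drop p.toList.length := by
            rw [hpieces, ih _ _ (by rw [hslice1, List.length_drop]; omega), hslice1]
            exact exists_perm_congr _ _ heperm _
          by_cases hCBv : check_can_build (PySem.Str.slice s (some (PySem.Str.len p)) none)
              (PySem.List.slice pieces none (some i)
                ++ PySem.List.slice pieces (some (i + 1)) none) = true
          · rw [if_pos hCBv]
            simp only [true_iff]
            exact ⟨p, by simp, hp0, htr0, hx, hCB.mp hCBv⟩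
          · rw [if_neg hCBv, ihr (PySem.Set.add tried p) hmem']
            constructor
            · rintro ⟨p', hm, hne, htr', hsw', hE'⟩
              refine ⟨p', by simp only [List.map_cons]; exact List.mem_cons_of_mem _ hm,
                hne, ?_, hsw', hE'⟩
              rcases h : PySem.Set.contains tried p' with _ | _
              · rfl
              · have : p' ∈ PySem.Set.add tried p :=
                  (PySem.Set.mem_add ..).mpr (Or.inl ((PySem.Set.contains_iff ..).mp h))
                rw [(PySem.Set.contains_iff ..).mpr this] at htr'
                exact absurd htr' (by simp)
            · rintro ⟨p', hm, hne, htr', hsw', hE'⟩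
              have hm2 : p' = p ∨ p' ∈ List.map (·.2) rest := by
                rw [List.map_cons] at hm; exact List.mem_cons.mp hm
              rcases hm2 with hpp | hm'
              · exact absurd (hCB.mpr (hpp ▸ hE')) hCBv
              · by_cases hpp' : p' = p
                · exact absurd (hCB.mpr (hpp' ▸ hE')) hCBv
                · refine ⟨p', hm', hne, ?_, hsw', hE'⟩
                  rcases h : PySem.Set.contains (PySem.Set.add tried p) p' with _ | _
                  · rfl
                  · have := (PySem.Set.contains_iff ..).mp h
                    rcases (PySem.Set.mem_add ..).mp this with hin | heq
                    · rw [(PySem.Set.contains_iff ..).mpr hin] at htr'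
                      exact absurd htr' (by simp)
                    · exact absurd heq hpp'
        · rw [dif_neg hx, ihr (PySem.Set.add tried p) hmem']
          constructor
          · rintro ⟨p', hm, hne, htr', hsw', hE'⟩
            refine ⟨p', by simp only [List.map_cons]; exact List.mem_cons_of_mem _ hm,
              hne, ?_, hsw', hE'⟩
            rcases h : PySem.Set.contains tried p' with _ | _
            · rfl
            · have : p' ∈ PySem.Set.add tried p :=
                (PySem.Set.mem_add ..).mpr (Or.inl ((PySem.Set.contains_iff ..).mp h))
              rw [(PySem.Set.contains_iff ..).mpr this] at htr'
              exact absurd htr' (by simp)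
          · rintro ⟨p', hm, hne, htr', hsw', hE'⟩
            have hm2 : p' = p ∨ p' ∈ List.map (·.2) rest := by
              rw [List.map_cons] at hm; exact List.mem_cons.mp hm
            rcases hm2 with hpp | hm'
            · exact absurd (hpp ▸ hsw') hx
            · by_cases hpp' : p' = p
              · exact absurd (hpp' ▸ hsw') hx
              · refine ⟨p', hm', hne, ?_, hsw', hE'⟩
                rcases h : PySem.Set.contains (PySem.Set.add tried p) p' with _ | _
                · rfl
                · have := (PySem.Set.contains_iff ..).mp h
                  rcases (PySem.Set.mem_add ..).mp this with hin | heq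
                  · rw [(PySem.Set.contains_iff ..).mpr hin] at htr'
                    exact absurd htr' (by simp)
                  · exact absurd heq hpp'
      · rw [dif_neg hcond, ihr tried hmem']
        constructor
        · rintro ⟨p', hm, hne, htr', hsw', hE'⟩
          exact ⟨p', by simp only [List.map_cons]; exact List.mem_cons_of_mem _ hm,
            hne, htr', hsw', hE'⟩
        · rintro ⟨p', hm, hne, htr', hsw', hE'⟩
          have hm2 : p' = p ∨ p' ∈ List.map (·.2) rest := by
            rw [List.map_cons] at hm; exact List.mem_cons.mp hm
          rcases hm2 with hpp | hm'
          · exfalso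
            apply hcond
            subst hpp
            simp only [Bool.and_eq_true, Bool.not_eq_true', beq_eq_false_iff_ne]
            exact ⟨hne, htr'⟩
          · exact ⟨p', hm', hne, htr', hsw', hE'⟩

theorem canBuild_iff_le (n : Nat) : ∀ (s : String) (pieces : List String),
    s.toList.length ≤ n →
    (check_can_build s pieces = true ↔
      ∃ K : List (List Char), K.Perm (pieces.map String.toList) ∧ K.flatten = s.toList) := by
  induction n with
  | zero =>
      intro s pieces hle
      have hs : s = "" := by
        refine String.toList_inj.mp ?_
        have : s.toList = [] := List.length_eq_zero_iff.mp (by omega)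
        rw [this]; rfl
      subst hs
      simpa using canBuild_empty_iff pieces
  | succ n ihn =>
      intro s pieces hle
      by_cases hs : s = ""
      · subst hs
        simpa using canBuild_empty_iff pieces
      · have hne : (s == "") = false := by simp [hs]
        rw [check_can_build, hne]
        simp only [Bool.false_eq_true, if_false]
        have hslen : s.toList ≠ [] := fun h => hs (String.toList_inj.mp (by rw [h]; rfl))
        rw [canGo_iff s.toList.length
          (fun s' pieces' hlt => ihn s' pieces' (by omega)) s rfl pieces
          (PySem.List.enumerate pieces 0) PySem.Set.empty
          (by
            intro q hq
            obtain ⟨k, hk, rfl⟩ := (PySem.List.mem_enumerate_iff _ _ _).mp hq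
            exact ⟨k, by simp, by rw [List.getElem?_eq_getElem hk]⟩)]
        rw [PySem.List.map_snd_enumerate]
        constructor
        · rintro ⟨p, hpmem, hpne, _, hsw, K', hK'perm, hK'flat⟩
          rw [PySem.Str.startswith_eq, PySem.Chars.startswith_iff] at hsw
          obtain ⟨t, ht⟩ := hsw
          have hmemmap : p.toList ∈ pieces.map String.toList := List.mem_map_of_mem hpmem
          refine ⟨p.toList :: K', (hK'perm.cons p.toList).trans
            (List.perm_cons_erase hmemmap).symm, ?_⟩
          have hdt : s.toList.drop p.toList.length = t := by rw [← ht, List.drop_left]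
          rw [List.flatten_cons, hK'flat, hdt, ht]
        · rintro ⟨K, hperm, hflat⟩
          have hflat1 : (K.filter (fun l => !l.isEmpty)).flatten = s.toList := by
            rw [flatten_filter_not_isEmpty, hflat]
          cases hK1 : K.filter (fun l => !l.isEmpty) with
          | nil =>
              rw [hK1] at hflat1
              exact absurd (by simpa using hflat1.symm) hslen
          | cons c K1 =>
              rw [hK1] at hflat1
              have hcK : c ∈ K := List.mem_of_mem_filter (by rw [hK1]; exact List.mem_cons_self ..)
              have hcne : c ≠ [] := by
                have := List.of_mem_filter (show c ∈ K.filter (fun l => !l.isEmpty) from by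
                  rw [hK1]; exact List.mem_cons_self ..)
                simpa [List.isEmpty_iff] using this
              obtain ⟨p, hp, hpc⟩ := List.mem_map.mp (hperm.subset hcK)
              have hpne : p ≠ "" := fun h => hcne (by rw [← hpc, h]; rfl)
              have hsw : PySem.Str.startswith s p = true := by
                rw [PySem.Str.startswith_eq, PySem.Chars.startswith_iff, hpc]
                exact ⟨K1.flatten, by rw [← hflat1]; rfl⟩
              refine ⟨p, hp, hpne, ?_, hsw, K1 ++ K.filter (fun l => l.isEmpty), ?_, ?_⟩
              · rfl
              · have hpart : ((c :: K1) ++ K.filter (fun l => l.isEmpty)).Perm K := by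
                  rw [← hK1]
                  refine List.Perm.trans ?_ (List.filter_append_perm (fun l => !l.isEmpty) K)
                  refine List.Perm.append_left _ (List.Perm.of_eq ?_)
                  refine List.filter_congr ?_
                  intro l _
                  simp
                have hcons : (c :: (K1 ++ K.filter (fun l => l.isEmpty))).Perm
                    (c :: ((pieces.map String.toList).erase c)) :=
                  (hpart.trans hperm).trans (List.perm_cons_erase (hperm.subset hcK))
                rw [← hpc] at hcons
                exact hcons.cons_inv
              · have hfe : (K.filter (fun l => l.isEmpty)).flatten = [] :=
                  List.flatten_eq_nil_iff.mpr
                    (fun l hl => by simpa using List.of_mem_filter hl)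
                rw [List.flatten_append, hfe, List.append_nil, hpc, ← hflat1, List.flatten_cons, List.drop_left]

theorem check_symmetric_spec : Claim_equal_check_symmetric := by
  intro Nc state1 state2 _ hpre
  have h0 : (0:Int) ≤ Nc := hpre
  show check_symmetric Nc state1 state2 = check_symmetric_alt Nc state1 state2
  rw [Bool.eq_iff_iff, checkA_iff Nc state1 state2 h0]
  unfold check_symmetric_alt
  simp only []
  rw [canBuild_iff_le state1.toList.length state1 _ (le_refl _)]
  set quarks := (PySem.List.pyRange 0 (2 * Nc) 2).map
    (fun i => PySem.Str.slice state2 (some i) (some (i + 2))) with hq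
  constructor
  · rintro ⟨p, hperm, hflat⟩
    exact ⟨p.map String.toList, hperm.map _, hflat⟩
  · rintro ⟨K, hperm, hflat⟩
    have hinj : Function.Injective String.toList := fun a b hab => String.toList_inj.mp hab
    have hKm : (K.map String.ofList).map String.toList = K := by
      rw [List.map_map]
      simp [Function.comp_def]
    refine ⟨K.map String.ofList, ?_, by rw [hKm]; exact hflat⟩
    exact (List.map_perm_map_iff hinj).mp
      (show ((K.map String.ofList).map String.toList).Perm (quarks.map String.toList) from by
        rw [hKm]; exact hperm)
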